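-- pv_equiv track=rewrite | github.com/elolab/VarSCAT | resource/HGVS_convert.py | in_seq_pattern
-- ===== SOURCE A (Python) =====
-- def FactorCalu(num):
-- 	divisor_num=[]
-- 	count=num//2
-- 	while count>0:
-- 		if num%count==0:
-- 			divisor_num.append(count)
-- 			count=count-1
-- 		else:
-- 			count=count-1
--
-- 	divisor_num.append(num)
--
-- 	return divisor_num
--
-- def in_seq_pattern(variant_seq):
-- 	divisor=FactorCalu(len(variant_seq))
-- 	repeat_time=[]
-- 	repeat_motif=[]
-- 	for m in divisor:
-- 		b=len(variant_seq)
-- 		a=len(variant_seq)-m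
-- 		pattern=variant_seq[a:b]
-- 		RT=1
-- 		RM=pattern
-- 		while a>0:
-- 			a=a-m
-- 			b=b-m
-- 			pattern_next=variant_seq[a:b]
-- 			if pattern==pattern_next:
-- 				RT=RT+1
-- 			else:
-- 				break
--
-- 		if RT*m==len(variant_seq):
-- 			repeat_time.append(RT)
-- 			repeat_motif.append(pattern)
--
-- 	if len(repeat_time)>1:
-- 		repeat_time2=repeat_time[-2]
-- 		repeat_motif2=repeat_motif[-2]
-- 	else:
-- 		repeat_time2=repeat_time[-1]
-- 		repeat_motif2=repeat_motif[-1]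
--
--
-- 	return repeat_time2,repeat_motif2
-- ===== SOURCE B (Python) =====
-- def in_seq_pattern(variant_seq):
--     n = len(variant_seq)
--     if n == 0:
--         return 1, variant_seq
--     for m in range(1, n + 1):
--         if n % m == 0 and variant_seq[m:] == variant_seq[:n - m]:
--             return n // m, variant_seq[:m]
-- ===== Notes on version B (the rewrite author's own statement) =====
-- stated objective: simpler
-- what changed: A enumerates all divisors descending, verifies each candidate motif block-by-block in an inner while loop, collects every qualifying repeat count/motif into two lists and finally picks the second-to-last entry; B scans candidate motif lengths ascending and returns at the first divisor m of len(s) for which the single shift comparison s[m:] == s[:-m] holds.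
import Mathlib
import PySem

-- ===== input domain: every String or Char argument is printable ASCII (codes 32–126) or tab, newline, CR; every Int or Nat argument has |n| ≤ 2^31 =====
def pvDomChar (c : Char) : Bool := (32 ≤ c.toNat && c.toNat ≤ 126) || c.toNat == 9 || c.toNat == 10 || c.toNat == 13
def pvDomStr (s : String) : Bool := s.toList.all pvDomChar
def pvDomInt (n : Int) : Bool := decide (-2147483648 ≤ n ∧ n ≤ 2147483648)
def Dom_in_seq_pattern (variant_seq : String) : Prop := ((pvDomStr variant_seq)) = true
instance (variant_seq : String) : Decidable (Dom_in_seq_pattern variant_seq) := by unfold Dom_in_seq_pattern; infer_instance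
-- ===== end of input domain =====

-- B replaces A's collect-all-divisors-then-pick-second-to-last scan (with a block-by-block
-- backward comparison per divisor) by a single ascending scan that returns at the first
-- divisor m for which one shift comparison s[m:] == s[:-m] certifies the period (objective: simpler).


-- ===== PORT A =====
-- FactorCalu's while loop: count runs num//2, num//2-1, …, 1 (fuel = the value of count; Python's 'while count>0')
def fcLoop (num : Int) : Nat → List Int
  | 0 => []
  | k+1 => (if PySem.Int.mod num ((k : Int) + 1) == 0 then [((k : Int) + 1)] else []) ++ fcLoop num k

def FactorCalu (num : Int) : List Int :=
  fcLoop num (PySem.Int.floordiv num 2).toNat ++ [num]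

-- the inner 'while a>0' loop of in_seq_pattern; fuel ≥ a iterations always suffices since each
-- iteration decreases a by m ≥ 1 (the fuel-out branch is unreachable at the call below)
def innerLoop (s : List Char) (m : Int) : Nat → Int → Int → List Char → Int → Int × List Char
  | 0, _, _, pattern, RT => (RT, pattern)
  | fuel+1, a, b, pattern, RT =>
    if a > 0 then
      let a' := a - m
      let b' := b - m
      let pattern_next := PySem.List.slice s (some a') (some b')
      if pattern == pattern_next then innerLoop s m fuel a' b' pattern (RT + 1)
      else (RT, pattern)
    else (RT, pattern)

def in_seq_pattern (variant_seq : String) : Int × String :=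
  let s := variant_seq.toList
  let n : Int := (s.length : Int)
  let divisor := FactorCalu n
  let p := divisor.foldl (fun (acc : List Int × List (List Char)) m =>
      let b := n
      let a := n - m
      let pattern := PySem.List.slice s (some a) (some b)
      let r := innerLoop s m a.toNat a b pattern 1
      if r.1 * m == n then (acc.1 ++ [r.1], acc.2 ++ [r.2]) else acc)
    ([], [])
  -- both result lists are provably nonempty (m = len always qualifies), so Python's [-1]/[-2]
  -- never raises and the .getD defaults are unreachable
  if p.1.length > 1 then
    ((PySem.List.pyGet? p.1 (-2)).getD 0, String.ofList ((PySem.List.pyGet? p.2 (-2)).getD []))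
  else
    ((PySem.List.pyGet? p.1 (-1)).getD 0, String.ofList ((PySem.List.pyGet? p.2 (-1)).getD []))

-- ===== PORT B =====
-- 'for m in range(1, n+1)' with early return; fuel = number of remaining candidates
-- (m = n always passes the test, so the fuel-out branch is unreachable)
def altLoop (s : List Char) : Nat → Int → Int × List Char
  | 0, _ => (1, [])
  | fuel+1, m =>
    let n : Int := (s.length : Int)
    if PySem.Int.mod n m == 0
        && PySem.List.slice s (some m) none == PySem.List.slice s none (some (n - m)) then
      (PySem.Int.floordiv n m, PySem.List.slice s none (some m))
    else altLoop s fuel (m + 1)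

def in_seq_pattern_alt (variant_seq : String) : Int × String :=
  let s := variant_seq.toList
  if s.length == 0 then (1, variant_seq)
  else
    let r := altLoop s s.length 1
    (r.1, String.ofList r.2)

-- ===== PRECONDITION & SPEC =====
def Spec_in_seq_pattern (variant_seq : String) (out : Int × String) : Prop := out = in_seq_pattern_alt variant_seq
instance (variant_seq : String) (out : Int × String) : Decidable (Spec_in_seq_pattern variant_seq out) := by unfold Spec_in_seq_pattern; infer_instance

-- ===== CLAIM (what is proved, stated in full; the proofs are below) =====
def Claim_equal_in_seq_pattern : Prop := ∀ (variant_seq : String), Dom_in_seq_pattern variant_seq → Spec_in_seq_pattern variant_seq (in_seq_pattern variant_seq)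

-- ===== LEMMAS AND PROOFS =====

-- the period test B runs for candidate m: shifting by m leaves l unchanged
def goodb (l : List Char) (m : Nat) : Bool := l.drop m == l.take (l.length - m)

-- the run of consecutive blocks (scanned downward from block j-1) equal to P, as counted by A's inner loop
def runD (l : List Char) (m : Nat) (P : List Char) : Nat → Nat
  | 0 => 0
  | j+1 => if (l.drop (j * m)).take m == P then runD l m P j + 1 else 0

-- the divisors of n that lie in (0, k], descending — the list FactorCalu's loop builds
def divisorsDesc (n : Nat) : Nat → List Nat
  | 0 => []
  | k+1 => (if n % (k+1) == 0 then [k+1] else []) ++ divisorsDesc n k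

lemma fcLoop_eq (n : Nat) (k : Nat) : fcLoop (n : Int) k = (divisorsDesc n k).map (fun (d : Nat) => (d : Int)) := by
  induction k with
  | zero => rfl
  | succ k ih =>
    have hc : ((k : Int) + 1) = ((k + 1 : Nat) : Int) := by push_cast; ring
    rw [fcLoop, divisorsDesc, hc, PySem.Int.mod_natCast]
    by_cases h : n % (k+1) = 0
    · simp [h, ih]
    · have hb : ((((n % (k+1) : Nat)) : Int) == 0) = false := by
        rw [beq_eq_false_iff_ne]
        exact_mod_cast h
      have hb2 : (n % (k+1) == 0) = false := by simpa using h
      simp only [hb, hb2, Bool.false_eq_true, if_false, List.nil_append, ih]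

lemma mem_divisorsDesc {n k d : Nat} : d ∈ divisorsDesc n k ↔ 0 < d ∧ d ≤ k ∧ n % d = 0 := by
  induction k with
  | zero => simp [divisorsDesc]; omega
  | succ k ih =>
    rw [divisorsDesc, List.mem_append, ih]
    by_cases h : n % (k+1) = 0
    · rw [if_pos (by simpa using h), List.mem_singleton]
      constructor
      · rintro (rfl | ⟨h1, h2, h3⟩)
        · exact ⟨by omega, by omega, h⟩
        · exact ⟨h1, by omega, h3⟩
      · rintro ⟨h1, h2, h3⟩
        rcases Nat.lt_or_ge d (k+1) with hd | hd
        · exact Or.inr ⟨h1, by omega, h3⟩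
        · exact Or.inl (by omega)
    · rw [if_neg (by simpa using h)]
      simp only [List.not_mem_nil, false_or]
      constructor
      · rintro ⟨h1, h2, h3⟩; exact ⟨h1, by omega, h3⟩
      · rintro ⟨h1, h2, h3⟩
        refine ⟨h1, ?_, h3⟩
        rcases Nat.lt_or_ge d (k+1) with hd | hd
        · omega
        · have hdk : d = k + 1 := by omega
          subst hdk
          exact absurd h3 h

-- structural facts about k copies of a motif P
lemma flatten_shift (P : List Char) (k : Nat) :
    ((List.replicate (k+1) P).flatten).drop P.length = (List.replicate k P).flatten := by
  rw [List.replicate_succ, List.flatten_cons, List.drop_left]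

lemma flatten_take (P : List Char) (k : Nat) :
    ((List.replicate (k+1) P).flatten).take ((List.replicate k P).flatten.length)
      = (List.replicate k P).flatten := by
  rw [List.replicate_succ', List.flatten_append]
  simp

lemma flatten_take_P (P : List Char) (k : Nat) :
    ((List.replicate (k+1) P).flatten).take P.length = P := by
  rw [List.replicate_succ, List.flatten_cons, List.take_left]

-- A's inner loop, started at a = j*m with j blocks below, adds runD … j to RT and keeps pattern
lemma innerLoop_eq (l : List Char) (m : Nat) (hm : 0 < m) :
    ∀ (j fuel : Nat), j ≤ fuel → ∀ (P : List Char) (RT : Int),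
      innerLoop l (m : Int) fuel ((j * m : Nat) : Int) (((j * m + m : Nat)) : Int) P RT
        = (RT + (runD l m P j : Int), P) := by
  intro j
  induction j with
  | zero =>
    intro fuel _ P RT
    cases fuel with
    | zero => simp [innerLoop, runD]
    | succ f => simp [innerLoop, runD]
  | succ j ih =>
    intro fuel hf P RT
    cases fuel with
    | zero => omega
    | succ f =>
      have ha : (0 : Int) < (((j+1) * m : Nat) : Int) := by
        have : 0 < (j+1) * m := Nat.mul_pos (by omega) hm
        exact_mod_cast this
      have h1 : (((j+1) * m : Nat) : Int) - (m : Int) = ((j * m : Nat) : Int) := by push_cast; ring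
      have h2 : (((j+1) * m + m : Nat) : Int) - (m : Int) = ((j * m + m : Nat) : Int) := by push_cast; ring
      rw [innerLoop, if_pos ha]
      simp only [h1, h2, PySem.List.slice_natCast, Nat.add_sub_cancel_left]
      by_cases hb : P = (l.drop (j * m)).take m
      · have hbeq : (P == (l.drop (j * m)).take m) = true := by simpa using hb
        rw [if_pos hbeq, ih f (by omega) P (RT + 1)]
        have hr : (l.drop (j * m)).take m == P := by simpa using hb.symm
        rw [runD, if_pos hr]
        have heq : RT + 1 + (runD l m P j : Int) = RT + ((runD l m P j + 1 : Nat) : Int) := by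
          push_cast; ring
        rw [heq]
      · have hbeq : (P == (l.drop (j * m)).take m) = false := by simpa using hb
        rw [if_neg (by simp [hbeq])]
        have hr : ((l.drop (j * m)).take m == P) = false := by
          simpa using fun h => hb h.symm
        rw [runD, if_neg (by simp [hr])]
        simp

lemma runD_le (l : List Char) (m : Nat) (P : List Char) (j : Nat) : runD l m P j ≤ j := by
  induction j with
  | zero => simp [runD]
  | succ j ih =>
    rw [runD]
    split <;> omega

lemma runD_eq_iff (l : List Char) (m : Nat) (P : List Char) (j : Nat) :
    runD l m P j = j ↔ ∀ i < j, (l.drop (i * m)).take m = P := by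
  induction j with
  | zero => simp [runD]
  | succ j ih =>
    rw [runD]
    by_cases hb : (l.drop (j * m)).take m = P
    · rw [if_pos (by simpa using hb)]
      constructor
      · intro h i hi
        rcases Nat.lt_or_ge i j with hij | hij
        · exact (ih.mp (by omega)) i hij
        · have : i = j := by omega
          subst this; exact hb
      · intro h
        have : runD l m P j = j := ih.mpr (fun i hi => h i (by omega))
        omega
    · rw [if_neg (by simpa using hb)]
      constructor
      · omega
      · intro h; exact absurd (h j (by omega)) hb

-- all k blocks equal P of length m  →  l is k copies of P
lemma eq_flatten_replicate (m : Nat) (P : List Char) (hP : P.length = m) :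
    ∀ (k : Nat) (l : List Char), l.length = k * m →
      (∀ i < k, (l.drop (i * m)).take m = P) → l = (List.replicate k P).flatten := by
  intro k
  induction k with
  | zero =>
    intro l hl _
    simp only [List.replicate_zero, List.flatten_nil]
    exact List.length_eq_zero_iff.mp (by simpa using hl)
  | succ k ih =>
    intro l hl hb
    have hdrop : l.drop (k * m) = P := by
      have h1 := hb k (by omega)
      have hlen : (l.drop (k * m)).length = m := by
        simp only [List.length_drop, hl, Nat.succ_mul]; omega
      rw [← h1]
      exact (List.take_of_length_le (by omega)).symm
    have hl' : (l.take (k * m)).length = k * m := by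
      simp only [List.length_take, hl, Nat.succ_mul]; omega
    have hbt : ∀ i < k, ((l.take (k * m)).drop (i * m)).take m = P := by
      intro i hi
      rw [List.drop_take, List.take_take]
      have hmin : min m (k * m - i * m) = m := by
        have h2 : (i + 1) * m ≤ k * m := Nat.mul_le_mul_right m (by omega)
        have h3 : (i + 1) * m = i * m + m := by ring
        omega
      rw [hmin]
      exact hb i (by omega)
    calc l = l.take (k * m) ++ l.drop (k * m) := (List.take_append_drop _ _).symm
    _ = (List.replicate k P).flatten ++ P := by rw [ih (l.take (k * m)) hl' hbt, hdrop]
    _ = (List.replicate (k+1) P).flatten := by rw [List.replicate_succ']; simp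

lemma length_flatten_replicate (P : List Char) (k : Nat) :
    (List.replicate k P).flatten.length = k * P.length := by
  induction k with
  | zero => simp
  | succ k ih => simp [List.replicate_succ, ih]; ring

-- core equivalence: for a divisor m of n = l.length (k blocks), A's all-blocks-equal test
-- agrees with B's single shift test
lemma blocks_iff_shift (l : List Char) (m k : Nat) (hm : 0 < m) (hn : l.length = k * m) :
    ((∀ i < k, (l.drop (i * m)).take m = (l.drop ((k-1) * m)).take m) ↔ goodb l m = true) := by
  rcases Nat.eq_zero_or_pos k with rfl | hk
  · have hl : l = [] := List.length_eq_zero_iff.mp (by simpa using hn)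
    subst hl; simp [goodb]
  · obtain ⟨k', rfl⟩ : ∃ k', k = k' + 1 := ⟨k - 1, by omega⟩
    simp only [Nat.add_sub_cancel]
    set P := (l.drop (k' * m)).take m with hPdef
    have hP : P.length = m := by
      rw [hPdef]
      simp only [List.length_take, List.length_drop, hn]
      have h2 : 1 * m ≤ (k' + 1) * m := Nat.mul_le_mul_right m (by omega)
      have h3 : (k' + 1) * m = k' * m + m := by ring
      omega
    constructor
    · intro hb
      have hfl := eq_flatten_replicate m P hP (k' + 1) l hn hb
      have h1 : l.drop m = (List.replicate k' P).flatten := by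
        conv_lhs => rw [hfl, ← hP]
        exact flatten_shift P k'
      have h2 : l.take (l.length - m) = (List.replicate k' P).flatten := by
        have hlen2 : l.length - m = (List.replicate k' P).flatten.length := by
          rw [length_flatten_replicate, hP, hn]
          have h3 : (k' + 1) * m = k' * m + m := by ring
          omega
        rw [hlen2]
        conv_lhs => rw [hfl]
        exact flatten_take P k'
      simp [goodb, h1, h2]
    · intro hg i hi
      have hshift : l.drop m = l.take (l.length - m) := by simpa [goodb] using hg
      have hcons : ∀ j, j + 2 ≤ k' + 1 → (l.drop ((j+1) * m)).take m = (l.drop (j * m)).take m := by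
        intro j hj
        have hd : l.drop ((j+1) * m) = (l.drop (j * m)).take (l.length - m - j * m) := by
          have hjm : (j+1) * m = j * m + m := by ring
          rw [hjm, Nat.add_comm, ← List.drop_drop, hshift, List.drop_take]
        rw [hd, List.take_take]
        congr 1
        have h2 : (j + 2) * m ≤ (k' + 1) * m := Nat.mul_le_mul_right m hj
        have h3 : (j + 2) * m = j * m + m + m := by ring
        omega
      have hchain : ∀ d i, i + d = k' → (l.drop (i * m)).take m = P := by
        intro d
        induction d with
        | zero => intro i hi; rw [show i = k' by omega]
        | succ d ihd =>
          intro i hi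
          have h1 : (l.drop (i * m)).take m = (l.drop ((i+1) * m)).take m := (hcons i (by omega)).symm
          rw [h1]
          exact ihd (i+1) (by omega)
      exact hchain (k' - i) i (by omega)

-- when the shift test passes, the last block (A's motif) is the first block (B's motif)
lemma last_block_eq_take (l : List Char) (m k : Nat) (hm : 0 < m) (hk : 0 < k) (hn : l.length = k * m)
    (hg : goodb l m = true) : (l.drop ((k-1) * m)).take m = l.take m := by
  have hb := (blocks_iff_shift l m k hm hn).mpr hg
  obtain ⟨k', rfl⟩ : ∃ k', k = k' + 1 := ⟨k - 1, by omega⟩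
  simp only [Nat.add_sub_cancel] at hb ⊢
  set P := (l.drop (k' * m)).take m with hPdef
  have hP : P.length = m := by
    rw [hPdef]
    simp only [List.length_take, List.length_drop, hn]
    have h2 : 1 * m ≤ (k' + 1) * m := Nat.mul_le_mul_right m (by omega)
    have h3 : (k' + 1) * m = k' * m + m := by ring
    omega
  have hfl := eq_flatten_replicate m P hP (k' + 1) l hn hb
  conv_rhs => rw [hfl, ← hP]
  exact (flatten_take_P P k').symm

-- A's foldl body as a named function (definitionally equal to the inline lambda of the port)
def stepA (l : List Char) (acc : List Int × List (List Char)) (m : Int) : List Int × List (List Char) :=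
  let n : Int := (l.length : Int)
  let b := n
  let a := n - m
  let pattern := PySem.List.slice l (some a) (some b)
  let r := innerLoop l m a.toNat a b pattern 1
  if r.1 * m == n then (acc.1 ++ [r.1], acc.2 ++ [r.2]) else acc

-- one step of A's foldl, for a divisor m of the (positive) length
lemma step_eq (l : List Char) (m : Nat) (hm : 0 < m) (hl : 0 < l.length) (hmn : m ∣ l.length)
    (acc : List Int × List (List Char)) :
    stepA l acc (m : Int)
      = if goodb l m then (acc.1 ++ [((l.length / m : Nat) : Int)], acc.2 ++ [l.take m]) else acc := by
  obtain ⟨k, hk⟩ := hmn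
  have hk0 : k ≠ 0 := by rintro rfl; rw [hk] at hl; simp at hl
  obtain ⟨k', rfl⟩ : ∃ k', k = k' + 1 := ⟨k - 1, by omega⟩
  have hn : l.length = (k' + 1) * m := by rw [hk]; ring
  have hmle : m ≤ l.length := by
    rw [hn]
    have h2 : 1 * m ≤ (k' + 1) * m := Nat.mul_le_mul_right m (by omega)
    omega
  have hdiv : l.length / m = k' + 1 := by rw [hn]; exact Nat.mul_div_cancel _ hm
  have hcast1 : (l.length : Int) - (m : Int) = ((l.length - m : Nat) : Int) := by omega
  have hpos : l.length - m = k' * m := by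
    have h3 : (k' + 1) * m = k' * m + m := by ring
    omega
  have hlen2 : (l.length : Int) = ((k' * m + m : Nat) : Int) := by
    rw [hn]; push_cast; ring
  show (if (innerLoop l (m : Int) ((l.length : Int) - (m : Int)).toNat ((l.length : Int) - (m : Int))
            ((l.length : Int))
            (PySem.List.slice l (some ((l.length : Int) - (m : Int))) (some ((l.length : Int)))) 1).1
          * (m : Int) == (l.length : Int)
        then (acc.1 ++ [(innerLoop l (m : Int) ((l.length : Int) - (m : Int)).toNat ((l.length : Int) - (m : Int))
            ((l.length : Int))
            (PySem.List.slice l (some ((l.length : Int) - (m : Int))) (some ((l.length : Int)))) 1).1],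
              acc.2 ++ [(innerLoop l (m : Int) ((l.length : Int) - (m : Int)).toNat ((l.length : Int) - (m : Int))
            ((l.length : Int))
            (PySem.List.slice l (some ((l.length : Int) - (m : Int))) (some ((l.length : Int)))) 1).2])
        else acc) = _
  rw [hcast1, hpos, hlen2, Int.toNat_natCast, PySem.List.slice_natCast]
  have htake : k' * m + m - k' * m = m := by omega
  rw [htake]
  have hfuel : k' ≤ k' * m := Nat.le_mul_of_pos_right k' hm
  rw [innerLoop_eq l m hm k' (k' * m) hfuel ((l.drop (k' * m)).take m) 1]
  by_cases hg : goodb l m = true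
  · have hall := (blocks_iff_shift l m (k' + 1) hm hn).mpr hg
    simp only [Nat.add_sub_cancel] at hall
    have hrun : runD l m ((l.drop (k' * m)).take m) k' = k' :=
      (runD_eq_iff l m _ k').mpr (fun i hi => hall i (by omega))
    have hcv : ((1 : Int) + ((runD l m ((l.drop (k' * m)).take m) k' : Nat) : Int)) * (m : Int)
        = ((k' * m + m : Nat) : Int) := by
      rw [hrun]; push_cast; ring
    rw [if_pos (by rw [hcv]; exact beq_self_eq_true _), if_pos hg]
    have hlast := last_block_eq_take l m (k' + 1) hm (by omega) hn hg
    simp only [Nat.add_sub_cancel] at hlast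
    rw [hrun, hdiv, hlast]
    have hv : (1 : Int) + (k' : Int) = ((k' + 1 : Nat) : Int) := by push_cast; ring
    rw [hv]
  · have hrle := runD_le l m ((l.drop (k' * m)).take m) k'
    have hne : runD l m ((l.drop (k' * m)).take m) k' ≠ k' := by
      intro hr
      apply hg
      apply (blocks_iff_shift l m (k' + 1) hm hn).mp
      simp only [Nat.add_sub_cancel]
      intro i hi
      rcases Nat.lt_or_ge i k' with hik | hik
      · exact (runD_eq_iff l m _ k').mp hr i hik
      · rw [show i = k' by omega]
    have hcf : (((1 : Int) + ((runD l m ((l.drop (k' * m)).take m) k' : Nat) : Int)) * (m : Int)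
        == ((k' * m + m : Nat) : Int)) = false := by
      rw [beq_eq_false_iff_ne]
      intro hceq
      apply hne
      have hnat : (1 + runD l m ((l.drop (k' * m)).take m) k') * m = k' * m + m := by
        exact_mod_cast hceq
      have h3 : (k' + 1) * m = k' * m + m := by ring
      have := Nat.eq_of_mul_eq_mul_right hm (hnat.trans h3.symm)
      omega
    rw [if_neg (by rw [hcf]; simp), if_neg (by simp [hg])]

-- A's whole foldl over a list of divisors collects exactly the qualifying ones
lemma foldl_steps (l : List Char) (hl : 0 < l.length) :
    ∀ (ms : List Nat) (acc : List Int × List (List Char)),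
      (∀ m ∈ ms, 0 < m ∧ m ∣ l.length) →
      ms.foldl (fun acc (m : Nat) => stepA l acc (m : Int)) acc
        = (acc.1 ++ (ms.filter (fun m => goodb l m)).map (fun m => ((l.length / m : Nat) : Int)),
           acc.2 ++ (ms.filter (fun m => goodb l m)).map (fun m => l.take m)) := by
  intro ms
  induction ms with
  | nil => intro acc _; simp
  | cons m ms ih =>
    intro acc h
    rw [List.foldl_cons,
      step_eq l m (h m List.mem_cons_self).1 hl (h m List.mem_cons_self).2 acc]
    by_cases hg : goodb l m = true
    · rw [if_pos hg, ih _ (fun d hd => h d (List.mem_cons_of_mem _ hd))]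
      simp [hg]
    · rw [if_neg hg, ih _ (fun d hd => h d (List.mem_cons_of_mem _ hd))]
      simp [hg]

-- B's scan returns at the least qualifying m
lemma altLoop_eq (l : List Char) (m₀ : Nat) (h0 : 0 < m₀) (hml : m₀ ≤ l.length)
    (hdvd : m₀ ∣ l.length) (hg : goodb l m₀ = true)
    (hmin : ∀ mm, 0 < mm → mm < m₀ → ¬(mm ∣ l.length ∧ goodb l mm = true)) :
    ∀ (fuel : Nat) (m : Nat), 0 < m → m ≤ m₀ → m₀ < m + fuel →
      altLoop l fuel (m : Int) = (((l.length / m₀ : Nat) : Int), l.take m₀) := by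
  intro fuel
  induction fuel with
  | zero => intro m _ _ _; omega
  | succ f ih =>
    intro m hm hmle hlt
    have hmlen : m ≤ l.length := le_trans hmle hml
    have hcast1 : (l.length : Int) - (m : Int) = ((l.length - m : Nat) : Int) := by omega
    rw [altLoop]
    simp only [PySem.Int.mod_natCast, hcast1, PySem.List.slice_from_natCast,
      PySem.List.slice_to_natCast]
    by_cases hmm : m = m₀
    · subst hmm
      have hmod0 : l.length % m = 0 := by
        obtain ⟨c, hc⟩ := hdvd; rw [hc]; exact Nat.mul_mod_right m c
      have h1 : ((l.length % m : Nat) : Int) == 0 := by simp [hmod0]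
      have h2 : l.drop m == l.take (l.length - m) := hg
      rw [if_pos (by rw [Bool.and_eq_true]; exact ⟨h1, h2⟩), PySem.Int.floordiv_natCast]
    · have hlt' : m < m₀ := by omega
      have hcond : ((((l.length % m : Nat) : Int) == 0) && (l.drop m == l.take (l.length - m))) = false := by
        rcases Bool.eq_false_or_eq_true ((((l.length % m : Nat) : Int) == 0) && (l.drop m == l.take (l.length - m))) with ht | hf
        case inr => exact hf
        case inl =>
          exfalso
          rw [Bool.and_eq_true] at ht
          apply hmin m hm hlt'
          constructor
          · apply Nat.dvd_of_mod_eq_zero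
            have h1 := ht.1
            rw [beq_iff_eq] at h1
            exact_mod_cast h1
          · exact ht.2
      rw [if_neg (by rw [hcond]; simp)]
      have hcast2 : (m : Int) + 1 = ((m + 1 : Nat) : Int) := by push_cast; ring
      rw [hcast2]
      exact ih (m + 1) (by omega) (by omega) (by omega)

-- the last surviving element of the descending divisor scan is the least qualifying m
lemma filter_divisorsDesc_getLast (l : List Char) (m₀ : Nat) (h0 : 0 < m₀)
    (hdvd : m₀ ∣ l.length) (hg : goodb l m₀ = true)
    (hmin : ∀ mm, 0 < mm → mm < m₀ → ¬(mm ∣ l.length ∧ goodb l mm = true)) :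
    ∀ k, m₀ ≤ k → ((divisorsDesc l.length k).filter (fun m => goodb l m)).getLast? = some m₀ := by
  intro k
  induction k with
  | zero => intro h; omega
  | succ k ih =>
    intro hle
    rw [divisorsDesc, List.filter_append]
    by_cases hc : m₀ ≤ k
    · have hih := ih hc
      have hne : ((divisorsDesc l.length k).filter (fun m => goodb l m)) ≠ [] := by
        intro hnil; rw [hnil] at hih; simp at hih
      rw [List.getLast?_append_of_ne_nil _ hne]
      exact hih
    · have hm₀k : m₀ = k + 1 := by omega
      have hfilnil : (divisorsDesc l.length k).filter (fun m => goodb l m) = [] := by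
        rw [List.filter_eq_nil_iff]
        intro d hd hgd
        have hdp := mem_divisorsDesc.mp hd
        exact hmin d hdp.1 (by omega) ⟨Nat.dvd_of_mod_eq_zero hdp.2.2, by simpa using hgd⟩
      have hmod : l.length % (k + 1) = 0 := by
        rw [← hm₀k]
        obtain ⟨c, hc⟩ := hdvd; rw [hc]; exact Nat.mul_mod_right m₀ c
      rw [hfilnil, List.append_nil, if_pos (by simpa using hmod)]
      have hgk : goodb l (k + 1) = true := hm₀k ▸ hg
      simp [hgk, hm₀k]

-- Python's [-2] on a nonempty-prefix ++ singleton list reads the prefix's last element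
lemma pyGet?_neg_two {α : Type} (ys : List α) (x : α) (h : ys ≠ []) :
    PySem.List.pyGet? (ys ++ [x]) (-2) = ys.getLast? := by
  have hpos : 0 < ys.length := List.length_pos_iff.mpr h
  rw [PySem.List.pyGet?_neg_ofNat (ys ++ [x]) 2 (by omega) (by simp; omega)]
  have hidx : (ys ++ [x]).length - 2 = ys.length - 1 := by simp
  rw [hidx, List.getElem?_append_left (by omega)]
  exact List.getLast?_eq_getElem?.symm

-- ===== VERDICT (by name: the statement is the Claim_ definition above) =====
theorem in_seq_pattern_spec : Claim_equal_in_seq_pattern := by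
  intro v _
  unfold Spec_in_seq_pattern
  have hA : in_seq_pattern v
      = (let p := (FactorCalu ((v.toList.length : Nat) : Int)).foldl (stepA v.toList) ([], []);
         if p.1.length > 1 then
           ((PySem.List.pyGet? p.1 (-2)).getD 0, String.ofList ((PySem.List.pyGet? p.2 (-2)).getD []))
         else
           ((PySem.List.pyGet? p.1 (-1)).getD 0, String.ofList ((PySem.List.pyGet? p.2 (-1)).getD []))) := rfl
  have hB : in_seq_pattern_alt v
      = (if v.toList.length == 0 then ((1 : Int), v)
         else ((altLoop v.toList v.toList.length 1).1, String.ofList (altLoop v.toList v.toList.length 1).2)) := rfl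
  rw [hA, hB]
  set l := v.toList with hldef
  rcases Nat.eq_zero_or_pos l.length with h0 | h0
  · -- empty string: both sides are (1, "")
    have hnil : l = [] := List.length_eq_zero_iff.mp h0
    have hv : String.ofList [] = v := by
      rw [← hnil, hldef]
      exact String.ofList_toList
    rw [hnil, if_pos (show ((List.length ([] : List Char) == 0) = true) from rfl)]
    rw [← hv]
    rfl
  · -- nonempty string
    have hgn : goodb l l.length = true := by simp [goodb]
    have hex : ∃ mm, 0 < mm ∧ mm ∣ l.length ∧ goodb l mm = true :=
      ⟨l.length, h0, dvd_refl _, hgn⟩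
    obtain ⟨m₀, ⟨hm₀pos, hm₀dvd, hm₀good⟩, hminraw⟩ :
        ∃ m₀, (0 < m₀ ∧ m₀ ∣ l.length ∧ goodb l m₀ = true)
          ∧ ∀ mm, mm < m₀ → ¬(0 < mm ∧ mm ∣ l.length ∧ goodb l mm = true) :=
      ⟨Nat.find hex, Nat.find_spec hex, fun mm h => Nat.find_min hex h⟩
    have hmin : ∀ mm, 0 < mm → mm < m₀ → ¬(mm ∣ l.length ∧ goodb l mm = true) := by
      intro mm h1 h2 h3
      exact hminraw mm h2 ⟨h1, h3.1, h3.2⟩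
    have hm₀le : m₀ ≤ l.length := by
      by_contra hh
      exact hminraw l.length (by omega) ⟨h0, dvd_refl _, hgn⟩
    have hBv : altLoop l l.length 1 = (((l.length / m₀ : Nat) : Int), l.take (m₀)) := by
      have h1 := altLoop_eq l m₀ hm₀pos hm₀le hm₀dvd hm₀good hmin l.length 1
        (by omega) (by omega) (by omega)
      simpa using h1
    rw [if_neg (show ¬((l.length == 0) = true) from by
      intro hq
      rw [beq_iff_eq] at hq
      omega), hBv]
    have h2c : (2 : Int) = ((2 : Nat) : Int) := rfl
    have hFC : FactorCalu ((l.length : Nat) : Int)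
        = ((divisorsDesc l.length (l.length / 2) ++ [l.length]).map (fun (d : Nat) => (d : Int))) := by
      rw [FactorCalu, h2c, PySem.Int.floordiv_natCast, Int.toNat_natCast, fcLoop_eq]
      simp
    have hmem : ∀ mm ∈ divisorsDesc l.length (l.length / 2) ++ [l.length], 0 < mm ∧ mm ∣ l.length := by
      intro mm hmm
      rcases List.mem_append.mp hmm with h | h
      · have hp := mem_divisorsDesc.mp h
        exact ⟨hp.1, Nat.dvd_of_mod_eq_zero hp.2.2⟩
      · rw [List.mem_singleton] at h
        subst h
        exact ⟨h0, dvd_refl _⟩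
    rw [hFC, List.foldl_map, foldl_steps l h0 _ ([], []) hmem, List.filter_append]
    have hfn : [l.length].filter (fun m => goodb l m) = [l.length] := by simp [hgn]
    rw [hfn]
    simp only [List.nil_append, List.map_append, List.map_cons, List.map_nil]
    by_cases hQnil : (divisorsDesc l.length (l.length / 2)).filter (fun m => goodb l m) = []
    · rw [hQnil]
      simp only [List.map_nil, List.nil_append]
      rw [if_neg (by simp)]
      have hm₀n : m₀ = l.length := by
        by_contra hne
        have hlt : m₀ < l.length := lt_of_le_of_ne hm₀le hne
        obtain ⟨c, hc⟩ := hm₀dvd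
        have hc0 : c ≠ 0 := by rintro rfl; rw [Nat.mul_zero] at hc; omega
        have hc1 : c ≠ 1 := by rintro rfl; rw [Nat.mul_one] at hc; omega
        have hmul : m₀ * 2 ≤ m₀ * c := Nat.mul_le_mul_left _ (by omega)
        have hhalf : m₀ ≤ l.length / 2 :=
          (Nat.le_div_iff_mul_le (by omega)).mpr (by rw [hc]; exact hmul)
        have hmod0 : l.length % m₀ = 0 := by rw [hc]; exact Nat.mul_mod_right _ _
        have hmem₀ : m₀ ∈ (divisorsDesc l.length (l.length / 2)).filter (fun m => goodb l m) := by
          rw [List.mem_filter]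
          exact ⟨mem_divisorsDesc.mpr ⟨hm₀pos, hhalf, hmod0⟩, hm₀good⟩
        rw [hQnil] at hmem₀
        simp at hmem₀
      simp only [PySem.List.pyGet?_neg_one, List.getLast?_singleton, Option.getD_some]
      rw [hm₀n]
    · have hne1 : (divisorsDesc l.length (l.length / 2)).filter (fun m => goodb l m) ≠ [] := hQnil
      have hQpos : 0 < ((divisorsDesc l.length (l.length / 2)).filter (fun m => goodb l m)).length :=
        List.length_pos_iff.mpr hne1
      rw [if_pos (by simpa using hQpos)]
      have hm₀half : m₀ ≤ l.length / 2 := by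
        obtain ⟨d, hd⟩ := List.exists_mem_of_ne_nil _ hne1
        rw [List.mem_filter] at hd
        have hdp := mem_divisorsDesc.mp hd.1
        have hfind : m₀ ≤ d := by
          by_contra hh
          exact hminraw d (by omega) ⟨hdp.1, Nat.dvd_of_mod_eq_zero hdp.2.2, hd.2⟩
        omega
      have hgl := filter_divisorsDesc_getLast l (m₀) hm₀pos hm₀dvd hm₀good hmin
        (l.length / 2) hm₀half
      rw [pyGet?_neg_two _ _ (by simp [hne1]), pyGet?_neg_two _ _ (by simp [hne1])]
      rw [List.getLast?_map, List.getLast?_map, hgl]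
      simp
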